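-- pv_equiv track=rewrite | github.com/agucova/lawful-rtd | summarize_book.py | chunk_blocks_grouped_by_h1
-- ===== SOURCE A (Python) =====
-- from typing import List, Tuple, Dict
--
-- FIRST_LEVEL_MAX_CHARS = 10000
--
-- def chunk_blocks_grouped_by_h1(
--     blocks: List[Tuple[str, str]],
--     max_chars: int = FIRST_LEVEL_MAX_CHARS
-- ) -> List[Tuple[str, List[str]]]:
--     """
--     First iteration chunking: group blocks by h1 header while respecting max_chars.
--     """
--     chunks: List[Tuple[str, List[str]]] = []
--     current_context: str = ""
--     current_blocks: List[str] = []
--     current_len = 0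
--
--     for (ctx, block_html) in blocks:
--         block_len = len(block_html)
--         if ctx != current_context or (current_len + block_len > max_chars):
--             if current_blocks:
--                 chunks.append((current_context, current_blocks))
--             current_context = ctx
--             current_blocks = [block_html]
--             current_len = block_len
--         else:
--             current_blocks.append(block_html)
--             current_len += block_len
--
--     if current_blocks:
--         chunks.append((current_context, current_blocks))
--
--     return chunks
-- ===== SOURCE B (Python) =====
-- from typing import List, Tuple
-- from itertools import groupby
--
-- FIRST_LEVEL_MAX_CHARS = 10000
--
-- def chunk_blocks_grouped_by_h1(
--     blocks: List[Tuple[str, str]],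
--     max_chars: int = FIRST_LEVEL_MAX_CHARS
-- ) -> List[Tuple[str, List[str]]]:
--     """Group consecutive same-context runs with groupby, then greedily pack each run."""
--     chunks: List[Tuple[str, List[str]]] = []
--     for ctx, run in groupby(blocks, key=lambda p: p[0]):
--         cur: List[str] = []
--         cur_len = 0
--         for _, html in run:
--             n = len(html)
--             if cur and cur_len + n > max_chars:
--                 chunks.append((ctx, cur))
--                 cur = [html]
--                 cur_len = n
--             else:
--                 cur.append(html)
--                 cur_len += n
--         if cur:
--             chunks.append((ctx, cur))
--     return chunks
-- ===== Notes on version B (the rewrite author's own statement) =====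
-- stated objective: alternative
-- what changed: B first splits the block list into maximal consecutive same-context runs (itertools.groupby) and then greedily packs each run independently, instead of A's single sweep carrying the current context in mutable state.
import Mathlib
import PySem

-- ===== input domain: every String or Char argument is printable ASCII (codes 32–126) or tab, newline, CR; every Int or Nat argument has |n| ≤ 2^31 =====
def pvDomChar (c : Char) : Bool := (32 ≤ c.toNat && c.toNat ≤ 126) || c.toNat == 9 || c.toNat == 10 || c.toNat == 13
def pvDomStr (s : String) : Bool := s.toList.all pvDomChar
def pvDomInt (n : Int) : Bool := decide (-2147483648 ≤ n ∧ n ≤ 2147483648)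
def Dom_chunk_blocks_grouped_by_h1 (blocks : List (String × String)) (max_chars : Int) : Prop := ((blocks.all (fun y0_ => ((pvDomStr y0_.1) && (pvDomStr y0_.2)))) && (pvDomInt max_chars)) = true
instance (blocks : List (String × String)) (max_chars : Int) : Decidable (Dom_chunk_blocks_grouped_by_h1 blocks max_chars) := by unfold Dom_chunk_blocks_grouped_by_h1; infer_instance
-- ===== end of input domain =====

-- B groups the blocks into maximal consecutive same-context runs first (itertools.groupby)
-- and then greedily packs each run; same result as A's single-state sweep (objective: alternative decomposition).


-- ===== PORT A =====
-- A's for-loop over blocks with state (chunks, current_context, current_blocks, current_len).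
def pvGoA (max_chars : Int) (chunks : List (String × List String)) (cctx : String)
    (cblocks : List String) (clen : Int) : List (String × String) → List (String × List String)
  | [] => if cblocks ≠ [] then chunks ++ [(cctx, cblocks)] else chunks
  | (ctx, block_html) :: rest =>
    let block_len : Int := PySem.Str.len block_html
    if ctx ≠ cctx ∨ clen + block_len > max_chars then
      pvGoA max_chars (if cblocks ≠ [] then chunks ++ [(cctx, cblocks)] else chunks)
        ctx [block_html] block_len rest
    else
      pvGoA max_chars chunks cctx (cblocks ++ [block_html]) (clen + block_len) rest

def chunk_blocks_grouped_by_h1 (blocks : List (String × String)) (max_chars : Int) : List (String × List String) :=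
  pvGoA max_chars [] "" [] 0 blocks

-- ===== PORT B =====
-- itertools.groupby(blocks, key=fst): maximal runs of consecutive equal contexts.
def pvRuns : List (String × String) → List (String × List String)
  | [] => []
  | (c, h) :: rest =>
    (c, h :: (rest.takeWhile (fun p => p.1 = c)).map (·.2)) :: pvRuns (rest.dropWhile (fun p => p.1 = c))
  termination_by l => l.length
  decreasing_by
    simp only [List.length_cons]
    exact Nat.lt_succ_of_le (List.length_dropWhile_le _ _)

-- greedy packing of one run's htmls (inner for-loop of B)
def pvPack (max_chars : Int) (ctx : String) (cur : List String) (clen : Int) : List String → List (String × List String)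
  | [] => if cur ≠ [] then [(ctx, cur)] else []
  | html :: rest =>
    let n : Int := PySem.Str.len html
    if cur ≠ [] ∧ clen + n > max_chars then
      (ctx, cur) :: pvPack max_chars ctx [html] n rest
    else
      pvPack max_chars ctx (cur ++ [html]) (clen + n) rest

def chunk_blocks_grouped_by_h1_alt (blocks : List (String × String)) (max_chars : Int) : List (String × List String) :=
  (pvRuns blocks).flatMap (fun g => pvPack max_chars g.1 [] 0 g.2)

-- ===== PRECONDITION & SPEC =====
def Spec_chunk_blocks_grouped_by_h1 (blocks : List (String × String)) (max_chars : Int) (out : List (String × List String)) : Prop := out = chunk_blocks_grouped_by_h1_alt blocks max_chars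
instance (blocks : List (String × String)) (max_chars : Int) (out : List (String × List String)) : Decidable (Spec_chunk_blocks_grouped_by_h1 blocks max_chars out) := by unfold Spec_chunk_blocks_grouped_by_h1; infer_instance

-- ===== CLAIM (what is proved, stated in full; the proofs are below) =====
def Claim_equal_chunk_blocks_grouped_by_h1 : Prop := ∀ (blocks : List (String × String)) (max_chars : Int), Dom_chunk_blocks_grouped_by_h1 blocks max_chars → Spec_chunk_blocks_grouped_by_h1 blocks max_chars (chunk_blocks_grouped_by_h1 blocks max_chars)

-- ===== LEMMAS AND PROOFS =====

-- the chunks accumulator of A's loop is a pure prefix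
theorem pvGoA_acc (max_chars : Int) (chunks : List (String × List String)) (cctx : String)
    (cblocks : List String) (clen : Int) (l : List (String × String)) :
    pvGoA max_chars chunks cctx cblocks clen l = chunks ++ pvGoA max_chars [] cctx cblocks clen l := by
  induction l generalizing chunks cctx cblocks clen with
  | nil => simp [pvGoA]; split <;> simp
  | cons p rest ih =>
    obtain ⟨ctx, html⟩ := p
    simp only [pvGoA]
    split
    · rw [ih, ih ((if cblocks ≠ [] then [] ++ [(cctx, cblocks)] else []))]
      split <;> simp
    · rw [ih, ih ([] : List (String × List String))]

-- A's sweep from state (cctx, cblocks, clen) = pack the leading cctx-run, then B on the remainder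
theorem pvGoA_eq (max_chars : Int) (l : List (String × String)) (cctx : String)
    (cblocks : List String) (clen : Int) (hinv : cblocks = [] → clen = 0) :
    pvGoA max_chars [] cctx cblocks clen l =
      pvPack max_chars cctx cblocks clen ((l.takeWhile (fun p => p.1 = cctx)).map (·.2)) ++
        chunk_blocks_grouped_by_h1_alt (l.dropWhile (fun p => p.1 = cctx)) max_chars := by
  induction l generalizing cctx cblocks clen with
  | nil =>
    simp [pvGoA, pvPack, chunk_blocks_grouped_by_h1_alt, pvRuns]
  | cons p rest ih =>
    obtain ⟨ctx, html⟩ := p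
    by_cases hc : ctx = cctx
    · subst hc
      simp only [pvGoA, pvPack, List.takeWhile_cons, List.dropWhile_cons, decide_true, if_true,
        List.map_cons, PySem.Str.len_eq, ne_eq, not_true_eq_false, false_or]
      by_cases hov : clen + (html.toList.length : Int) > max_chars
      · by_cases hne : cblocks = []
        · subst hne
          have h0 : clen = 0 := hinv rfl
          subst h0
          rw [if_pos hov, if_neg (by simp), if_neg (by simp)]
          rw [ih _ _ _ (by simp)]
          simp
        · rw [if_pos hov]; rw [if_pos hne]; rw [if_pos (And.intro hne hov)]
          rw [pvGoA_acc, ih _ _ _ (by simp)]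
          simp
      · rw [if_neg hov, if_neg (by rintro ⟨-, h⟩; exact hov h)]
        exact ih _ _ _ (by simp)
    · simp only [pvGoA, List.takeWhile_cons, List.dropWhile_cons, decide_eq_true_eq, if_neg hc,
        List.map_nil, PySem.Str.len_eq]
      rw [if_pos (Or.inl (by simpa using hc))]
      rw [pvGoA_acc, ih _ _ _ (by simp)]
      conv_rhs => rw [chunk_blocks_grouped_by_h1_alt]
      rw [pvRuns]
      simp only [List.flatMap_cons]
      have hstep : pvPack max_chars ctx [] 0 (html :: (rest.takeWhile (fun p => p.1 = ctx)).map (·.2)) =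
          pvPack max_chars ctx [html] (PySem.Str.len html) ((rest.takeWhile (fun p => p.1 = ctx)).map (·.2)) := by
        simp [pvPack]
      rw [hstep]
      split <;> rename_i hcb <;> simp [chunk_blocks_grouped_by_h1_alt, pvPack, hcb]

-- ===== VERDICT (by name: the statement is the Claim_ definition above) =====
theorem chunk_blocks_grouped_by_h1_spec : Claim_equal_chunk_blocks_grouped_by_h1 := by
  intro blocks max_chars _
  unfold Spec_chunk_blocks_grouped_by_h1 chunk_blocks_grouped_by_h1
  rw [pvGoA_eq max_chars blocks "" [] 0 (fun _ => rfl)]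
  cases blocks with
  | nil => simp [pvPack, chunk_blocks_grouped_by_h1_alt, pvRuns]
  | cons p rest =>
    obtain ⟨ctx, html⟩ := p
    by_cases hc : ctx = ""
    · subst hc
      simp only [List.takeWhile_cons, List.dropWhile_cons, decide_true]
      conv_rhs => rw [chunk_blocks_grouped_by_h1_alt]
      rw [pvRuns]
      simp only [List.flatMap_cons]
      have hstep : pvPack max_chars "" [] 0 (html :: (rest.takeWhile (fun p => p.1 = "")).map (·.2)) =
          pvPack max_chars "" [html] (PySem.Str.len html) ((rest.takeWhile (fun p => p.1 = "")).map (·.2)) := by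
        simp [pvPack]
      simp [hstep, chunk_blocks_grouped_by_h1_alt]
    · simp [hc, pvPack]
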